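-- pv_equiv track=rewrite | github.com/PolarBearITS/google-foobar | level4/running_with_bunnies.py | DFS
-- ===== SOURCE A (Python) =====
-- def DFS(graph, depth, v, target, path=[]):
-- 	results = []
-- 	if depth == 0 and v == target:
-- 		return [path + [v]]
-- 	if len(path) < len(graph)+1:
-- 		for u, weight in enumerate(graph[v]):
-- 			if u != v:
-- 				results.extend(DFS(graph, depth-weight, u, target, path + [v]))
-- 	return results
-- ===== SOURCE B (Python) =====
-- def DFS(graph, depth, v, target, path=[]):
--     # iterative worklist version: explicit stack of (remaining depth, node, path) frames
--     results = []
--     stack = [(depth, v, path)]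
--     while stack:
--         d, node, p = stack.pop()
--         if d == 0 and node == target:
--             results.append(p + [node])
--         elif len(p) < len(graph) + 1:
--             row = graph[node]
--             for u, w in reversed(list(enumerate(row))):
--                 if u != node:
--                     stack.append((d - w, u, p + [node]))
--     return results
-- ===== Notes on version B (the rewrite author's own statement) =====
-- stated objective: alternative
-- what changed: The recursive pre-order DFS is re-decomposed as an iterative loop over an explicit worklist stack of (remaining-depth, node, path) frames, pushing neighbours in reverse index order so pop order reproduces A's pre-order result sequence.
-- outside the precondition, e.g. on DFS([[], [0, 0, 0]], 1, 0, 0, []): A returns [], B returns []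
import Mathlib
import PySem

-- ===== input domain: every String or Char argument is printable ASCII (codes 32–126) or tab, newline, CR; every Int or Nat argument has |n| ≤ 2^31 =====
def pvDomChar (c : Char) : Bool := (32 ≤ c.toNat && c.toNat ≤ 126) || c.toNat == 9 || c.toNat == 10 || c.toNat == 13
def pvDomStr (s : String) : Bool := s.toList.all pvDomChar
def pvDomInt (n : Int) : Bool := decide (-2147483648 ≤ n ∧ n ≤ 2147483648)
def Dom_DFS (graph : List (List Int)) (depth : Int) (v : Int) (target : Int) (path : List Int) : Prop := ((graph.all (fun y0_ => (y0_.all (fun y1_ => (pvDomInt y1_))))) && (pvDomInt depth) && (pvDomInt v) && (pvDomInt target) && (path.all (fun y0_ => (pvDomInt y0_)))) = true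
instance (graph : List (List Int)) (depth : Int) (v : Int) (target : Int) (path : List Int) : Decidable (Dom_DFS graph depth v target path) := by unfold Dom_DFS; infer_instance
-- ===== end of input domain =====

-- B re-decomposes A's recursive DFS as an iterative explicit-stack worklist loop (same asymptotic cost; return-value equivalence).

-- ===== PORT A =====
-- graph[v] is PySem.List.pyGet?; the `none` arm is Python's IndexError, excluded by Pre_DFS.
def DFS (graph : List (List Int)) (depth : Int) (v : Int) (target : Int) (path : List Int) : List (List Int) :=
  if depth = 0 ∧ v = target then [path ++ [v]]
  else if path.length < graph.length + 1 then
    match PySem.List.pyGet? graph v with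
    | some row =>
        (PySem.List.enumerate row 0).foldl
          (fun results uw =>
            if uw.1 ≠ v then results ++ DFS graph (depth - uw.2) uw.1 target (path ++ [v])
            else results) []
    | none => []      -- Python raises IndexError here (outside Pre_DFS)
  else []
termination_by graph.length + 1 - path.length
decreasing_by simp; omega

-- ===== PORT B =====
-- termination measure for the worklist loop: Σ over frames of K ^ (n+1 - |path|), with K above the branching
def pvBranch (graph : List (List Int)) : Nat :=
  graph.foldr (fun r k => max r.length k) 0 + graph.length + 2
def pvFrameM (graph : List (List Int)) (f : Int × Int × List Int) : Nat :=
  pvBranch graph ^ (graph.length + 1 - f.2.2.length)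
def pvStackM (graph : List (List Int)) (st : List (Int × Int × List Int)) : Nat :=
  (st.map (pvFrameM graph)).sum

theorem pv_row_le_branch {graph : List (List Int)} {row : List Int} (h : row ∈ graph) :
    row.length + 2 ≤ pvBranch graph := by
  unfold pvBranch
  have : row.length ≤ graph.foldr (fun r k => max r.length k) 0 := by
    induction graph with
    | nil => cases h
    | cons a l ih =>
      rcases List.mem_cons.mp h with rfl | h'
      · exact le_max_left _ _
      · exact le_trans (ih h') (le_max_right _ _)
  omega

theorem pv_foldl_cons_if (node d : Int) (p : List Int) (l : List (Int × Int))
    (st : List (Int × Int × List Int)) :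
    l.reverse.foldl (fun st uw => if uw.1 ≠ node then (d - uw.2, uw.1, p ++ [node]) :: st else st) st
      = (l.filter (fun uw => decide (uw.1 ≠ node))).map
          (fun uw => (d - uw.2, uw.1, p ++ [node])) ++ st := by
  rw [List.foldl_reverse]
  induction l with
  | nil => rfl
  | cons a l ih =>
    simp only [List.foldr_cons, List.filter_cons, ih]
    by_cases h : a.1 ≠ node <;> simp [h]

theorem pv_push_measure (graph : List (List Int)) (d node : Int) (p : List Int)
    {row : List Int} (hrow : PySem.List.pyGet? graph node = some row)
    (hp : p.length < graph.length + 1) (rest : List (Int × Int × List Int)) :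
    pvStackM graph
      ((PySem.List.enumerate row 0).reverse.foldl
        (fun st uw => if uw.1 ≠ node then (d - uw.2, uw.1, p ++ [node]) :: st else st) rest)
      < pvStackM graph ((d, node, p) :: rest) := by
  have hmem : row ∈ graph := PySem.List.mem_of_pyGet?_eq_some graph hrow
  have hB : row.length + 2 ≤ pvBranch graph := pv_row_le_branch hmem
  rw [pv_foldl_cons_if node d p]
  set fl := (PySem.List.enumerate row 0).filter (fun uw => decide (uw.1 ≠ node)) with hfl
  have hcount : fl.length ≤ row.length := by
    calc fl.length ≤ (PySem.List.enumerate row 0).length := List.length_filter_le _ _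
    _ = row.length := PySem.List.length_enumerate _ _
  have hmap : (fl.map (fun uw : Int × Int => (d - uw.2, uw.1, p ++ [node]))).map (pvFrameM graph)
      = fl.map (fun _ => pvBranch graph ^ (graph.length - p.length)) := by
    rw [List.map_map]
    apply List.map_congr_left
    intro x _
    simp only [Function.comp, pvFrameM, List.length_append, List.length_cons, List.length_nil]
    congr 1
    omega
  unfold pvStackM
  rw [List.map_append, List.sum_append, hmap, List.map_const', List.sum_replicate, smul_eq_mul]
  simp only [List.map_cons, List.sum_cons]
  have hfr : pvFrameM graph (d, node, p)
      = pvBranch graph ^ (graph.length - p.length) * pvBranch graph := by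
    unfold pvFrameM
    have : graph.length + 1 - p.length = (graph.length - p.length) + 1 := by omega
    rw [this, pow_succ]
  rw [hfr]
  have hBpos : 0 < pvBranch graph := by unfold pvBranch; omega
  have hK : 0 < pvBranch graph ^ (graph.length - p.length) := Nat.pow_pos hBpos
  have : fl.length * pvBranch graph ^ (graph.length - p.length)
      < pvBranch graph ^ (graph.length - p.length) * pvBranch graph := by
    rw [Nat.mul_comm (pvBranch graph ^ (graph.length - p.length))]
    exact Nat.mul_lt_mul_of_lt_of_le (by omega) (le_refl _) hK
  omega

def DFS_altLoop (graph : List (List Int)) (target : Int) :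
    List (Int × Int × List Int) → List (List Int)
  | [] => []
  | (d, node, p) :: rest =>
    if d = 0 ∧ node = target then
      (p ++ [node]) :: DFS_altLoop graph target rest
    else if p.length < graph.length + 1 then
      match h : PySem.List.pyGet? graph node with
      | some row =>
          DFS_altLoop graph target
            ((PySem.List.enumerate row 0).reverse.foldl
              (fun st uw => if uw.1 ≠ node then (d - uw.2, uw.1, p ++ [node]) :: st else st) rest)
      | none => DFS_altLoop graph target rest   -- Python raises IndexError here (outside Pre_DFS)
    else DFS_altLoop graph target rest
termination_by st => pvStackM graph st
decreasing_by
  · have hBpos : 0 < pvBranch graph := by unfold pvBranch; omega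
    have : 0 < pvFrameM graph (d, node, p) := Nat.pow_pos hBpos
    simp [pvStackM]; omega
  · exact pv_push_measure graph d node p h (by omega) rest
  · have hBpos : 0 < pvBranch graph := by unfold pvBranch; omega
    have : 0 < pvFrameM graph (d, node, p) := Nat.pow_pos hBpos
    simp [pvStackM]; omega
  · have hBpos : 0 < pvBranch graph := by unfold pvBranch; omega
    have : 0 < pvFrameM graph (d, node, p) := Nat.pow_pos hBpos
    simp [pvStackM]; omega

def DFS_alt (graph : List (List Int)) (depth : Int) (v : Int) (target : Int) (path : List Int) : List (List Int) :=
  DFS_altLoop graph target [(depth, v, path)]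

-- ===== PRECONDITION & SPEC =====
-- Pre_DFS excludes the inputs on which A raises IndexError (start vertex out of Python index
-- range, or some row longer than the graph so a neighbour index can fall outside it), except
-- when A returns without ever indexing (immediate depth-0 hit at the start vertex, or a path
-- already longer than the graph). It is conservative: on a few excluded inputs the offending
-- row is unreachable and A still returns (see the cites); B returns the same value there.
def Pre_DFS (graph : List (List Int)) (depth : Int) (v : Int) (target : Int) (path : List Int) : Prop :=
  (depth = 0 ∧ v = target) ∨ (graph.length + 1 ≤ path.length) ∨
  (PySem.Raise.InRange graph.length v ∧ ∀ row ∈ graph, row.length ≤ graph.length)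
instance (graph : List (List Int)) (depth : Int) (v : Int) (target : Int) (path : List Int) : Decidable (Pre_DFS graph depth v target path) := by unfold Pre_DFS; infer_instance
def pvWitness_DFS : List (List Int) × Int × Int × Int × List Int := ([[0, 2], [2, 0]], 2, 0, 1, [])

def Spec_DFS (graph : List (List Int)) (depth : Int) (v : Int) (target : Int) (path : List Int) (out : List (List Int)) : Prop := out = DFS_alt graph depth v target path
instance (graph : List (List Int)) (depth : Int) (v : Int) (target : Int) (path : List Int) (out : List (List Int)) : Decidable (Spec_DFS graph depth v target path out) := by unfold Spec_DFS; infer_instance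

-- ===== CLAIM (what is proved, stated in full; the proofs are below) =====
def Claim_equal_DFS : Prop := ∀ (graph : List (List Int)) (depth : Int) (v : Int) (target : Int) (path : List Int), Dom_DFS graph depth v target path → Pre_DFS graph depth v target path → Spec_DFS graph depth v target path (DFS graph depth v target path)

-- ===== LEMMAS AND PROOFS =====

-- Python's "results.extend(g(x)) under an if" loop shape, as a filter + flatMap
theorem pv_foldl_extend_if (graph : List (List Int)) (target node d : Int) (p : List Int)
    (l : List (Int × Int)) (acc : List (List Int)) :
    l.foldl (fun results uw =>
        if uw.1 ≠ node then results ++ DFS graph (d - uw.2) uw.1 target (p ++ [node])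
        else results) acc
      = acc ++ (l.filter (fun uw => decide (uw.1 ≠ node))).flatMap
          (fun uw => DFS graph (d - uw.2) uw.1 target (p ++ [node])) := by
  induction l generalizing acc with
  | nil => simp
  | cons a l ih =>
    simp only [List.foldl_cons, List.filter_cons]
    by_cases h : a.1 ≠ node
    · rw [if_pos h, ih]
      simp [h, List.append_assoc]
    · rw [if_neg h, ih]
      simp [h]

-- A's recursive step, as a flatMap over the filtered neighbour list
theorem DFS_expand (graph : List (List Int)) (d node target : Int) (p row : List Int)
    (hbase : ¬(d = 0 ∧ node = target)) (hlen : p.length < graph.length + 1)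
    (hrow : PySem.List.pyGet? graph node = some row) :
    DFS graph d node target p
      = ((PySem.List.enumerate row 0).filter (fun uw => decide (uw.1 ≠ node))).flatMap
          (fun uw => DFS graph (d - uw.2) uw.1 target (p ++ [node])) := by
  conv_lhs => rw [DFS]
  simp only [if_neg hbase, if_pos hlen, hrow]
  simpa using pv_foldl_extend_if graph target node d p (PySem.List.enumerate row 0) []

-- the worklist loop processes its frames independently, in order, each frame yielding
-- exactly what A's recursive DFS yields on that frame
theorem pv_loop_flatMap (graph : List (List Int)) (target : Int)
    (stack : List (Int × Int × List Int)) :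
    DFS_altLoop graph target stack
      = stack.flatMap (fun f => DFS graph f.1 f.2.1 target f.2.2) := by
  induction stack using DFS_altLoop.induct graph target with
  | case1 => simp [DFS_altLoop]
  | case2 d node p rest hbase ih =>
    rw [DFS_altLoop, if_pos hbase, ih]
    have hD : DFS graph d node target p = [p ++ [node]] := by rw [DFS, if_pos hbase]
    simp [hD]
  | case3 d node p rest hbase hlen row hrow ih =>
    rw [DFS_altLoop, if_neg hbase, if_pos hlen]
    split
    case _ row' hrow' =>
      obtain rfl : row' = row := by rw [hrow] at hrow'; exact (Option.some.inj hrow').symm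
      simp only [dite_eq_ite] at ih
      have hD := DFS_expand graph d node target p row' hbase hlen hrow'
      rw [ih, pv_foldl_cons_if node d p, List.flatMap_append, List.flatMap_map]
      simp [hD]
    case _ hrow' => rw [hrow] at hrow'; cases hrow'
  | case4 d node p rest hbase hlen hrow ih =>
    rw [DFS_altLoop, if_neg hbase, if_pos hlen]
    split
    case _ row' hrow' => rw [hrow] at hrow'; cases hrow'
    case _ _ =>
    rw [ih]
    have hD : DFS graph d node target p = [] := by rw [DFS, if_neg hbase, if_pos hlen, hrow]
    simp [hD]
  | case5 d node p rest hbase hlen ih =>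
    rw [DFS_altLoop, if_neg hbase, if_neg hlen, ih]
    have hD : DFS graph d node target p = [] := by rw [DFS, if_neg hbase, if_neg hlen]
    simp [hD]

-- ===== VERDICT (by name: the statement is the Claim_ definition above) =====
theorem DFS_spec : Claim_equal_DFS := by
  intro graph depth v target path _ _
  unfold Spec_DFS DFS_alt
  rw [pv_loop_flatMap]
  simp
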